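-- pv_equiv track=rewrite | github.com/pedropreto/CodeAdvent | 2023/day9.py | find_next_sequence
-- ===== SOURCE A (Python) =====
-- def find_next_sequence(sequence, last_elements):
--     new_sequence = [1] * (len(sequence) - 1)
--     for i in range(0, len(new_sequence)):
--         new_sequence[i] = sequence[i+1] - sequence[i]
--
--     if len(new_sequence) == 0:
--         last_elements = [0]
--     elif new_sequence != [0] * len(new_sequence):
--         last_elements.append(new_sequence[-1])
--         new_sequence, last_elements = find_next_sequence(new_sequence, last_elements)
--
--     return new_sequence, last_elements
-- ===== SOURCE B (Python) =====
-- def find_next_sequence(sequence, last_elements):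
--     # Iterative while-loop version; like A it appends to the caller's
--     # last_elements in place and returns ([0]-overwritten list) on the
--     # empty terminal level, exactly as A does.
--     while True:
--         new_sequence = [b - a for a, b in zip(sequence, sequence[1:])]
--         if not new_sequence:
--             return new_sequence, [0]
--         if all(v == 0 for v in new_sequence):
--             return new_sequence, last_elements
--         last_elements.append(new_sequence[-1])
--         sequence = new_sequence
-- ===== Notes on version B (the rewrite author's own statement) =====
-- stated objective: simpler
-- what changed: Replaced A's recursion with preallocated [1]*n buffer, index-loop mutation and [0]*n comparison by an iterative while-loop that builds each difference level with zip and tests all-zero with all(); both mutate last_elements in place.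
import Mathlib
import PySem

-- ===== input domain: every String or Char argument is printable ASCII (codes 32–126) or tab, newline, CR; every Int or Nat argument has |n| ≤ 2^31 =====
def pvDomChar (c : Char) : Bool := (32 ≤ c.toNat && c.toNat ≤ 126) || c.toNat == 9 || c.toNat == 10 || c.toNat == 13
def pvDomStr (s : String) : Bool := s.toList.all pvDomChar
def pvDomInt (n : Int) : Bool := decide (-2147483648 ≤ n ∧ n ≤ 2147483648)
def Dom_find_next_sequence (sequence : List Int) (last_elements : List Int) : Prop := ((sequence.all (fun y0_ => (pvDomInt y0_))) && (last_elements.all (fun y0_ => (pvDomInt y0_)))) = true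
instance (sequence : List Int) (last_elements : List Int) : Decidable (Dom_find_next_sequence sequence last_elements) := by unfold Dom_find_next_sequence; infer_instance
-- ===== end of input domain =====

-- B replaces A's recursion over a mutated [1]*n buffer and its [0]*n comparison by an
-- iterative zip-based loop with an all()-zero test (objective: simpler). Both Pythons
-- append to the caller's last_elements in place; the equivalence proved is about the
-- return value (the in-place appends are the same in A and B).

-- termination helper for port A (cited in decreasing_by): the index loop keeps the buffer's length
theorem foldl_set_length (g : Nat → Int) :
    ∀ (l : List Nat) (acc : List Int),
      (l.foldl (fun acc i => acc.set i (g i)) acc).length = acc.length := by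
  intro l
  induction l with
  | nil => intro acc; rfl
  | cons x xs ih => intro acc; rw [List.foldl_cons, ih]; simp

-- ===== PORT A =====
-- A: new_sequence = [1]*(len-1), then an index loop overwriting each slot
-- (a foldl of List.set over range), then recursion when the level is not [0]*n.
def find_next_sequence (sequence : List Int) (last_elements : List Int) : List Int × List Int :=
  let n := sequence.length - 1
  let new_sequence :=
    (List.range n).foldl
      (fun acc i => acc.set i (sequence.getD (i + 1) 0 - sequence.getD i 0))
      (List.replicate n 1)
  if _h0 : new_sequence.length = 0 then
    (new_sequence, [0])
  else if new_sequence ≠ List.replicate new_sequence.length 0 then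
    find_next_sequence new_sequence (last_elements ++ [new_sequence.getLast!])
  else
    (new_sequence, last_elements)
termination_by sequence.length
decreasing_by
  · have hlen := foldl_set_length
      (fun i => sequence.getD (i + 1) 0 - sequence.getD i 0)
      (List.range (sequence.length - 1))
      (List.replicate (sequence.length - 1) 1)
    rw [List.length_replicate] at hlen
    simp only [n, new_sequence] at *
    omega

-- ===== PORT B =====
-- B: each level via zip of the list with its tail; the while-loop is the tail recursion.
def find_next_sequence_alt (sequence : List Int) (last_elements : List Int) : List Int × List Int :=
  let ns := (sequence.zip sequence.tail).map (fun p => p.2 - p.1)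
  if _h : ns.isEmpty then (ns, [0])
  else if ns.all (fun v => v == 0) then (ns, last_elements)
  else find_next_sequence_alt ns (last_elements ++ [ns.getLast!])
termination_by sequence.length
decreasing_by
  · have hlen : ((sequence.zip sequence.tail).map (fun (p : Int × Int) => p.2 - p.1)).length
        = min sequence.length sequence.tail.length := by
      rw [List.length_map, List.length_zip]
    have ht : sequence.tail.length = sequence.length - 1 := by
      rw [List.length_tail]
    simp only [ns, List.isEmpty_iff] at _h
    have hpos := List.length_pos_of_ne_nil _h
    simp only [ns] at *
    omega

-- ===== PRECONDITION & SPEC =====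
def Spec_find_next_sequence (sequence : List Int) (last_elements : List Int) (out : List Int × List Int) : Prop := out = find_next_sequence_alt sequence last_elements
instance (sequence : List Int) (last_elements : List Int) (out : List Int × List Int) : Decidable (Spec_find_next_sequence sequence last_elements out) := by unfold Spec_find_next_sequence; infer_instance

-- ===== CLAIM (what is proved, stated in full; the proofs are below) =====
def Claim_equal_find_next_sequence : Prop := ∀ (sequence : List Int) (last_elements : List Int), Dom_find_next_sequence sequence last_elements → Spec_find_next_sequence sequence last_elements (find_next_sequence sequence last_elements)

-- ===== LEMMAS AND PROOFS =====

-- A's foldl-of-set loop over an n-slot buffer realises the map over range n.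
theorem foldl_set_range (f : Nat → Int) :
    ∀ (n : Nat) (acc : List Int), n ≤ acc.length →
      (List.range n).foldl (fun acc i => acc.set i (f i)) acc
        = (List.range n).map f ++ acc.drop n := by
  intro n
  induction n with
  | zero => intro acc _; simp
  | succ n ih =>
    intro acc hle
    rw [List.range_succ, List.foldl_append, List.map_append, ih acc (by omega)]
    have hn : n < acc.length := by omega
    rw [List.drop_eq_getElem_cons hn]
    simp
    rw [List.drop_eq_getElem_cons hn, List.set_cons_zero]

-- the level A builds equals the level B builds
theorem lvlA_eq (sequence : List Int) :
    (List.range (sequence.length - 1)).foldl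
        (fun acc i => acc.set i (sequence.getD (i + 1) 0 - sequence.getD i 0))
        (List.replicate (sequence.length - 1) 1)
      = (sequence.zip sequence.tail).map (fun p => p.2 - p.1) := by
  rw [foldl_set_range _ _ _ (by simp)]
  simp only [List.drop_replicate, Nat.sub_self, List.replicate_zero, List.append_nil]
  apply List.ext_getElem
  · simp
  · intro i h1 h2
    have hi : i < sequence.length - 1 := by simpa using h1
    have hi1 : i + 1 < sequence.length := by omega
    simp [List.getD_eq_getElem?_getD, List.getElem?_eq_getElem hi1,
      List.getElem?_eq_getElem (by omega : i < sequence.length), List.getElem_tail]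

-- B's all()-zero test is A's comparison with [0]*n
theorem all_zero_iff (l : List Int) :
    (l.all (fun v => v == 0)) = true ↔ l = List.replicate l.length 0 := by
  rw [List.eq_replicate_iff]
  simp [List.all_eq_true]

theorem main_equiv : ∀ (fuel : Nat) (s l : List Int), s.length ≤ fuel →
    find_next_sequence s l = find_next_sequence_alt s l := by
  intro fuel
  induction fuel with
  | zero =>
    intro s l hs
    have : s = [] := List.eq_nil_of_length_eq_zero (by omega)
    subst this
    rw [find_next_sequence, find_next_sequence_alt]
    simp
  | succ fuel ih =>
    intro s l hs
    rw [find_next_sequence, find_next_sequence_alt]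
    simp only [lvlA_eq s]
    set ns := (s.zip s.tail).map (fun p => p.2 - p.1) with hns
    by_cases h0 : ns.length = 0
    · have hnil : ns = [] := List.eq_nil_of_length_eq_zero h0
      rw [hnil]
      simp
    · have hne : ¬ (ns.isEmpty = true) := by
        simp only [List.isEmpty_iff]
        intro h; rw [h] at h0; simp at h0
      rw [dif_neg h0, dif_neg hne]
      by_cases hz : ns = List.replicate ns.length 0
      · rw [if_neg (not_not_intro hz), if_pos ((all_zero_iff ns).2 hz)]
      · rw [if_pos hz, if_neg (fun h => hz ((all_zero_iff ns).1 h))]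
        have hlen : ns.length ≤ fuel := by
          have h1 : ns.length = min s.length s.tail.length := by
            rw [hns, List.length_map, List.length_zip]
          have h2 : s.tail.length = s.length - 1 := by rw [List.length_tail]
          omega
        exact ih ns (l ++ [ns.getLast!]) hlen

-- ===== VERDICT (by name: the statement is the Claim_ definition above) =====
theorem find_next_sequence_spec : Claim_equal_find_next_sequence := by
  intro s l _
  unfold Spec_find_next_sequence
  exact main_equiv s.length s l le_rfl
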